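-- pv_equiv track=rewrite | github.com/afrantisak/gen_prime | lib/vector.py | get_deltas
-- ===== SOURCE A (Python) =====
-- def get_deltas(iterable, init):
--     x = []
--     y = []
--     last = init
--     for num in iterable:
--         x += [num]
--         y += [num - last]
--         last = num
--     return x, y
-- ===== SOURCE B (Python) =====
-- def get_deltas(iterable, init):
--     x = list(iterable)
--     stack = list(x)
--     y = []
--     while stack:
--         top = stack.pop()
--         y.append(top - (stack[-1] if stack else init))
--     y.reverse()
--     return x, y
-- ===== Notes on version B (the rewrite author's own statement) =====
-- stated objective: alternative
-- what changed: Replaces A's single forward accumulator-threaded loop (carrying x, y and a running 'last') with a back-to-front build: deltas are produced in reverse order by popping an explicit stack and peeking at its new top for the predecessor, then reversed once at the end; no running 'last' state is kept.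
import Mathlib
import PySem

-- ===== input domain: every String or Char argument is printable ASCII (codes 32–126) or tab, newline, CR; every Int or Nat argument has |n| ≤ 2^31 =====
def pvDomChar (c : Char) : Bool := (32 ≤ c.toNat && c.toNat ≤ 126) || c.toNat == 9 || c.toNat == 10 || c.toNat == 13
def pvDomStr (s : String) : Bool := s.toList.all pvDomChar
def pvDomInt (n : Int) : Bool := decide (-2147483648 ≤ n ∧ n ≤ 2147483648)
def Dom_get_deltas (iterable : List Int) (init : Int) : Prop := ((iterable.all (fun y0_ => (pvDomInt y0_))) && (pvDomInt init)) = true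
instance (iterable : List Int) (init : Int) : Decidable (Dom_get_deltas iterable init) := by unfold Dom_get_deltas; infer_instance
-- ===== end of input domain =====

-- B replaces A's forward accumulator-threaded loop with a back-to-front build over an explicit stack; objective: alternative.

-- ===== PORT A =====
-- literal transliteration: one forward loop threading (x, y, last)
def get_deltas (iterable : List Int) (init : Int) : List Int × List Int :=
  let st := iterable.foldl
    (fun (acc : List Int × List Int × Int) num =>
      (acc.1 ++ [num], acc.2.1 ++ [num - acc.2.2], num))
    ([], [], init)
  (st.1, st.2.1)

-- ===== PORT B =====
-- termination fact for the while loop: a successful pop shortens the stack (cited by decreasing_by)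
theorem pv_pop_shrinks {α : Type} {xs rest : List α} {top : α}
    (h : PySem.List.pop? xs = some (top, rest)) : rest.length < xs.length := by
  induction xs using List.reverseRecOn with
  | nil => simp [PySem.List.pop?, PySem.List.pyIdx?] at h
  | append_singleton ys a _ =>
    rw [PySem.List.pop?_last] at h
    cases h
    simp

-- while stack: top = stack.pop(); y.append(top - (stack[-1] if stack else init))
def get_deltas_altLoop (init : Int) (stack y : List Int) : List Int :=
  match h : PySem.List.pop? stack with
  | none => y
  | some (top, rest) =>
      get_deltas_altLoop init rest
        (y ++ [top - (if rest.isEmpty then init else PySem.List.pyGetD rest (-1) 0)])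
termination_by stack.length
decreasing_by exact pv_pop_shrinks h

-- x = list(iterable); stack = list(x); y built back-to-front then reversed
def get_deltas_alt (iterable : List Int) (init : Int) : List Int × List Int :=
  let x := iterable
  let y := get_deltas_altLoop init x []
  (x, y.reverse)

-- ===== PRECONDITION & SPEC =====
def Spec_get_deltas (iterable : List Int) (init : Int) (out : List Int × List Int) : Prop := out = get_deltas_alt iterable init
instance (iterable : List Int) (init : Int) (out : List Int × List Int) : Decidable (Spec_get_deltas iterable init out) := by unfold Spec_get_deltas; infer_instance

-- ===== CLAIM (what is proved, stated in full; the proofs are below) =====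
def Claim_equal_get_deltas : Prop := ∀ (iterable : List Int) (init : Int), Dom_get_deltas iterable init → Spec_get_deltas iterable init (get_deltas iterable init)

-- ===== LEMMAS AND PROOFS =====
-- common form of the delta list
def pvDeltas (init : Int) (l : List Int) : List Int :=
  (List.zip (init :: l) l).map (fun ab => ab.2 - ab.1)

theorem pvDeltas_snoc (init a : Int) (xs : List Int) :
    pvDeltas init (xs ++ [a]) = pvDeltas init xs ++ [a - xs.getLastD init] := by
  induction xs generalizing init with
  | nil => simp [pvDeltas]
  | cons h t ih =>
    simp only [pvDeltas, List.cons_append, List.zip_cons_cons, List.map_cons] at *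
    rw [ih h, List.getLastD_cons]

theorem get_deltas_A_loop (l : List Int) (last : Int) (xa ya : List Int) :
    l.foldl (fun (acc : List Int × List Int × Int) num =>
      (acc.1 ++ [num], acc.2.1 ++ [num - acc.2.2], num)) (xa, ya, last)
    = (xa ++ l, ya ++ pvDeltas last l, l.getLastD last) := by
  induction l generalizing last xa ya with
  | nil => simp [pvDeltas]
  | cons h t ih =>
    simp only [List.foldl_cons, ih, pvDeltas, List.zip_cons_cons, List.map_cons,
      List.getLastD_cons]
    simp

theorem get_deltas_B_loop (init : Int) (stack y : List Int) :
    get_deltas_altLoop init stack y = y ++ (pvDeltas init stack).reverse := by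
  induction stack using List.reverseRecOn generalizing y with
  | nil =>
    rw [get_deltas_altLoop]
    split
    · simp [pvDeltas]
    · rename_i top rest heq
      simp [PySem.List.pop?, PySem.List.pyIdx?] at heq
  | append_singleton xs a ih =>
    rw [get_deltas_altLoop]
    split
    · rename_i heq
      rw [PySem.List.pop?_last] at heq
      cases heq
    · rename_i top rest heq
      rw [PySem.List.pop?_last] at heq
      simp only [Option.some.injEq, Prod.mk.injEq] at heq
      obtain ⟨rfl, rfl⟩ := heq
      rw [ih, pvDeltas_snoc]
      by_cases hxs : xs = []
      · simp [hxs]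
      · simp [hxs, List.isEmpty_iff, PySem.List.pyGetD_neg_one xs 0 hxs,
          List.getLastD_eq_getLast?, List.getLast?_eq_some_getLast hxs]

-- ===== VERDICT (by name: the statement is the Claim_ definition above) =====
theorem get_deltas_spec : Claim_equal_get_deltas := by
  intro iterable init _
  unfold Spec_get_deltas get_deltas get_deltas_alt
  simp [get_deltas_A_loop, get_deltas_B_loop]
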